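-- pv_equiv track=rewrite | github.com/Disas721/Avito_internship2025 | eval_f1.py | to_squeezed_and_truth
-- ===== SOURCE A (Python) =====
-- def to_squeezed_and_truth(s: str):
--     """Возвращает (s_no_space, truth_set_of_positions)"""
--     s = " ".join(s.strip().split())
--     no = s.replace(" ", "")
--     pos = set()
--     i_no = 0
--     for i, ch in enumerate(s[:-1]):
--         if ch != " " and s[i+1] == " ":
--             pos.add(i_no + 1)
--         if ch != " ":
--             i_no += 1
--     return no, pos
-- ===== SOURCE B (Python) =====
-- def to_squeezed_and_truth(s: str):
--     """Возвращает (s_no_space, truth_set_of_positions)"""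
--     words = s.strip().split()
--     no = "".join(words)
--     pos = set()
--     total = 0
--     for w in words[:-1]:
--         total += len(w)
--         pos.add(total)
--     return no, pos
-- ===== Notes on version B (the rewrite author's own statement) =====
-- stated objective: simpler
-- what changed: B splits the string into words once and records running prefix sums of word lengths over words[:-1], instead of A's character-by-character scan of the re-joined string that tracks a parallel no-space index and tests each character's successor; the per-word loop replaces the per-character Python-level loop, a constant-factor speedup.
import Mathlib
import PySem

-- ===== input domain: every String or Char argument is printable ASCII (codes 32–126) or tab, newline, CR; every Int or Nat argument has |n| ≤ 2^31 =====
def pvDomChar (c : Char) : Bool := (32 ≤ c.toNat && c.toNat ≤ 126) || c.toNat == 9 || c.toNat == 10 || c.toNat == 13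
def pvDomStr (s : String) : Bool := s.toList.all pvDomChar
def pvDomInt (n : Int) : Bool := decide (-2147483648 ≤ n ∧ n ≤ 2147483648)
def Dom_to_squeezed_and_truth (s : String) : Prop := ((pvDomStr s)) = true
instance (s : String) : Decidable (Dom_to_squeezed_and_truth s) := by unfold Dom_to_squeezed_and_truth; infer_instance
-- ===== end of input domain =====

-- B splits once into words and adds prefix sums of word lengths over words[:-1],
-- instead of A's character scan of the re-joined string with a parallel no-space index (objective: simpler).


-- ===== PORT A =====
def to_squeezed_and_truth (s : String) : String × List Int :=
  let s2 : String := PySem.Str.join " " (PySem.Str.split₀ (PySem.Str.strip s))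
  let no : String := PySem.Str.replace s2 " " ""
  let res : PySem.Set Int × Int :=
    (PySem.List.enumerate (PySem.List.slice s2.toList none (some (-1))) 0).foldl
      (fun st p =>
        (if p.2 ≠ ' ' ∧ PySem.List.pyGet? s2.toList (p.1 + 1) = some ' '
           then PySem.Set.add st.1 (st.2 + 1) else st.1,
         if p.2 ≠ ' ' then st.2 + 1 else st.2))
      (PySem.Set.empty, 0)
  (no, res.1)

-- ===== PORT B =====
def to_squeezed_and_truth_alt (s : String) : String × List Int :=
  let words : List String := PySem.Str.split₀ (PySem.Str.strip s)
  let no : String := PySem.Str.join "" words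
  let res : PySem.Set Int × Int :=
    (PySem.List.slice words none (some (-1))).foldl
      (fun st w =>
        let total := st.2 + PySem.Str.len w
        (PySem.Set.add st.1 total, total))
      (PySem.Set.empty, 0)
  (no, res.1)

-- ===== PRECONDITION & SPEC =====
def Spec_to_squeezed_and_truth (s : String) (out : String × List Int) : Prop := out = to_squeezed_and_truth_alt s
instance (s : String) (out : String × List Int) : Decidable (Spec_to_squeezed_and_truth s out) := by unfold Spec_to_squeezed_and_truth; infer_instance

-- ===== CLAIM (what is proved, stated in full; the proofs are below) =====
def Claim_equal_to_squeezed_and_truth : Prop := ∀ (s : String), Dom_to_squeezed_and_truth s → Spec_to_squeezed_and_truth s (to_squeezed_and_truth s)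

-- ===== LEMMAS AND PROOFS =====

-- The step of A's character loop, expressed on an adjacent pair (current char, next char).
def pvBodyP (st : PySem.Set Int × Int) (p : Char × Char) : PySem.Set Int × Int :=
  (if p.1 ≠ ' ' ∧ p.2 = ' ' then PySem.Set.add st.1 (st.2 + 1) else st.1,
   if p.1 ≠ ' ' then st.2 + 1 else st.2)

-- The step of B's word loop, on char-level words.
def pvBodyB (st : PySem.Set Int × Int) (w : List Char) : PySem.Set Int × Int :=
  (PySem.Set.add st.1 (st.2 + (w.length : Int)), st.2 + (w.length : Int))

-- Every word produced by split() is nonempty and contains no space (loop invariant of split₀.go).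
lemma pvGoGood : ∀ (s cur : List Char) (acc : List (List Char)),
    ' ' ∉ cur → (∀ w ∈ acc, w ≠ [] ∧ ' ' ∉ w) →
    ∀ w ∈ PySem.Chars.split₀.go s cur acc, w ≠ [] ∧ ' ' ∉ w := by
  intro s
  induction s with
  | nil =>
    intro cur acc hc ha w hw
    rw [PySem.Chars.split₀.go] at hw
    by_cases h : cur.isEmpty
    · simp only [h, if_true, List.mem_reverse] at hw
      exact ha w hw
    · simp only [h, Bool.false_eq_true, if_false, List.mem_reverse, List.mem_cons] at hw
      rcases hw with hw | hw
      · subst hw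
        refine ⟨?_, ?_⟩
        · simp only [ne_eq, List.reverse_eq_nil_iff]
          simpa [List.isEmpty_iff] using h
        · simpa using hc
      · exact ha w hw
  | cons c rest ih =>
    intro cur acc hc ha w hw
    rw [PySem.Chars.split₀.go] at hw
    by_cases hs : PySem.Chars.isspace c = true
    · by_cases h : cur.isEmpty
      · simp only [hs, h, if_true] at hw
        exact ih [] acc (by simp) ha w hw
      · simp only [hs, h, Bool.false_eq_true, if_false, if_true] at hw
        refine ih [] (cur.reverse :: acc) (by simp) ?_ w hw
        intro v hv
        rcases List.mem_cons.mp hv with hv | hv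
        · subst hv
          refine ⟨?_, ?_⟩
          · simp only [ne_eq, List.reverse_eq_nil_iff]
            simpa [List.isEmpty_iff] using h
          · simpa using hc
        · exact ha v hv
    · simp only [hs, Bool.false_eq_true, if_false] at hw
      refine ih (c :: cur) acc ?_ ha w hw
      intro hmem
      rcases List.mem_cons.mp hmem with hmem | hmem
      · exact hs (by rw [← hmem]; decide)
      · exact hc hmem

lemma pvWordsGood (cs : List Char) : ∀ w ∈ PySem.Chars.split₀ cs, w ≠ [] ∧ ' ' ∉ w := by
  intro w hw
  exact pvGoGood cs [] [] (by simp) (by simp) w hw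

-- replace(s, " ", "") is filtering out the spaces.
lemma pvReplaceGo : ∀ (fuel : Nat) (l acc : List Char), l.length ≤ fuel →
    PySem.Chars.replace.go [' '] [] fuel l acc = acc.reverse ++ l.filter (fun c => !(c == ' ')) := by
  intro fuel
  induction fuel with
  | zero =>
    intro l acc hl
    have hnil : l = [] := by
      cases l with
      | nil => rfl
      | cons a t => simp at hl
    subst hnil
    rw [PySem.Chars.replace.go]
    simp
  | succ n ih =>
    intro l acc hl
    cases l with
    | nil =>
      rw [PySem.Chars.replace.go]
      simp
      omega
    | cons c t =>
      rw [PySem.Chars.replace.go]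
      by_cases hc : c = ' '
      · subst hc
        have hpre : [' '].isPrefixOf (' ' :: t) = true := by
          simp [List.isPrefixOf]
        rw [hpre]
        simp only [if_true]
        have hd : List.drop ([' '] : List Char).length (' ' :: t) = t := by simp
        rw [hd]
        simp only [List.reverse_nil, List.nil_append]
        rw [ih t acc (by simpa using Nat.le_of_succ_le_succ hl)]
        simp
      · have hpre : [' '].isPrefixOf (c :: t) = false := by
          simp [List.isPrefixOf]
          exact fun h => hc h.symm
        rw [hpre]
        simp only [Bool.false_eq_true, if_false]
        rw [ih t (c :: acc) (by simpa using Nat.le_of_succ_le_succ hl)]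
        simp [hc]

lemma pvReplaceSpaces (cs : List Char) :
    PySem.Chars.replace cs [' '] [] = cs.filter (fun c => !(c == ' ')) := by
  unfold PySem.Chars.replace
  simp only [List.isEmpty_cons, Bool.false_eq_true, if_false]
  simpa using pvReplaceGo cs.length cs [] le_rfl

-- A word with no space is unchanged by the space filter.
lemma pvFilterSelf (w : List Char) (hw : ' ' ∉ w) :
    w.filter (fun c => !(c == ' ')) = w := by
  apply List.filter_eq_self.mpr
  intro c hc
  have hne : c ≠ ' ' := fun he => hw (he ▸ hc)
  simp [hne]

-- Filtering spaces out of " ".join(words) gives "".join(words).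
lemma pvFilterJoin : ∀ (ws : List (List Char)), (∀ w ∈ ws, ' ' ∉ w) →
    (PySem.Chars.join [' '] ws).filter (fun c => !(c == ' ')) = PySem.Chars.join [] ws := by
  intro ws
  induction ws with
  | nil => intro _; simp [PySem.Chars.join_nil]
  | cons w tail ih =>
    intro h
    cases tail with
    | nil =>
      simp only [PySem.Chars.join_singleton]
      exact pvFilterSelf w (h w (by simp))
    | cons v rest =>
      rw [PySem.Chars.join_cons_cons, PySem.Chars.join_cons_cons]
      rw [List.filter_append, List.filter_append]
      rw [pvFilterSelf w (h w (by simp))]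
      have h2 : (([' '] : List Char).filter (fun c => !(c == ' '))) = ([] : List Char) := by decide
      rw [h2, ih (fun u hu => h u (by simp [hu]))]

-- A's enumerate-and-index loop is the fold of pvBodyP over adjacent pairs.
lemma pvEnumZip (cs : List Char) (st : PySem.Set Int × Int) :
    (PySem.List.enumerate cs.dropLast 0).foldl
      (fun st (p : Int × Char) =>
        (if p.2 ≠ ' ' ∧ PySem.List.pyGet? cs (p.1 + 1) = some ' '
           then PySem.Set.add st.1 (st.2 + 1) else st.1,
         if p.2 ≠ ' ' then st.2 + 1 else st.2)) st
    = (cs.zip cs.tail).foldl pvBodyP st := by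
  have L1 : (PySem.List.enumerate cs.dropLast 0).map
        (fun p : Int × Char => (p.2, PySem.List.pyGet? cs (p.1 + 1)))
      = (cs.zip cs.tail).map (fun p => (p.1, some p.2)) := by
    apply List.ext_getElem
    · simp [PySem.List.length_enumerate]
    · intro i h1 h2
      have hlen : i + 1 < cs.length := by
        simp [PySem.List.length_enumerate] at h1
        omega
      have he : i < (PySem.List.enumerate cs.dropLast 0).length := by
        simpa using h1
      simp only [List.getElem_map, PySem.List.getElem_enumerate, List.getElem_zip,
        List.getElem_tail, List.getElem_dropLast]
      have hcast : (0 : Int) + (i : Int) + 1 = ((i + 1 : Nat) : Int) := by push_cast; ring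
      rw [hcast, PySem.List.pyGet?_natCast]
      simp [List.getElem?_eq_getElem hlen]
  have key : ∀ (l : List (Int × Char)) (st : PySem.Set Int × Int),
      l.foldl (fun st (p : Int × Char) =>
        (if p.2 ≠ ' ' ∧ PySem.List.pyGet? cs (p.1 + 1) = some ' '
           then PySem.Set.add st.1 (st.2 + 1) else st.1,
         if p.2 ≠ ' ' then st.2 + 1 else st.2)) st
      = (l.map (fun p : Int × Char => (p.2, PySem.List.pyGet? cs (p.1 + 1)))).foldl
          (fun st (q : Char × Option Char) =>
            (if q.1 ≠ ' ' ∧ q.2 = some ' ' then PySem.Set.add st.1 (st.2 + 1) else st.1,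
             if q.1 ≠ ' ' then st.2 + 1 else st.2)) st := by
    intro l st
    rw [List.foldl_map]
  rw [key, L1, List.foldl_map]
  have hfun : (fun (st : PySem.Set Int × Int) (p : Char × Char) =>
      (if p.1 ≠ ' ' ∧ (some p.2 : Option Char) = some ' '
         then PySem.Set.add st.1 (st.2 + 1) else st.1,
       if p.1 ≠ ' ' then st.2 + 1 else st.2)) = pvBodyP := by
    funext st' p
    simp [pvBodyP]
  rw [hfun]

-- Pairs whose second component is not a space leave the position set unchanged.
lemma pvNoSpaceSnd : ∀ (l : List (Char × Char)) (st : PySem.Set Int × Int),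
    (∀ p ∈ l, p.2 ≠ ' ') → (l.foldl pvBodyP st).1 = st.1 := by
  intro l
  induction l with
  | nil => intro st _; rfl
  | cons p t ih =>
    intro st h
    have hp : p.2 ≠ ' ' := h p (by simp)
    simp only [List.foldl_cons]
    rw [ih _ (fun q hq => h q (by simp [hq]))]
    simp [pvBodyP, hp]

-- Scanning the last word adds no positions.
lemma pvLastWord (w : List Char) (hw : ' ' ∉ w) (st : PySem.Set Int × Int) :
    ((w.zip w.tail).foldl pvBodyP st).1 = st.1 := by
  apply pvNoSpaceSnd
  intro p hp he
  exact hw (he ▸ List.mem_of_mem_tail (List.of_mem_zip hp).2)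

-- Crossing one word into the separator space records exactly the prefix sum.
lemma pvCross : ∀ (w : List Char), w ≠ [] → ' ' ∉ w → ∀ (rest : List Char) (st : PySem.Set Int × Int),
    ((w ++ ' ' :: rest).zip (w ++ ' ' :: rest).tail).foldl pvBodyP st
    = ((' ' :: rest).zip rest).foldl pvBodyP
        (PySem.Set.add st.1 (st.2 + (w.length : Int)), st.2 + (w.length : Int)) := by
  intro w
  induction w with
  | nil => intro h; exact absurd rfl h
  | cons a w' ih =>
    intro _ hsp rest st
    have ha : a ≠ ' ' := fun he => hsp (by simp [he])
    cases w' with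
    | nil =>
      simp only [List.cons_append, List.nil_append, List.tail_cons, List.zip_cons_cons,
        List.foldl_cons]
      have : pvBodyP st (a, ' ') = (PySem.Set.add st.1 (st.2 + 1), st.2 + 1) := by
        simp [pvBodyP, ha]
      rw [this]
      norm_num
    | cons b w'' =>
      have hb : b ≠ ' ' := fun he => hsp (by simp [he])
      simp only [List.cons_append, List.tail_cons, List.zip_cons_cons, List.foldl_cons]
      have hstep : pvBodyP st (a, b) = (st.1, st.2 + 1) := by
        simp [pvBodyP, ha, hb]
      rw [hstep]
      have := ih (by simp) (fun hm => hsp (by simp [hm])) rest (st.1, st.2 + 1)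
      simp only [List.cons_append, List.tail_cons] at this
      rw [this]
      have harith : st.2 + 1 + ((b :: w'').length : Int)
          = st.2 + ((a :: b :: w'').length : Int) := by
        simp only [List.length_cons]
        push_cast
        ring
      rw [harith]



-- The separator space itself changes nothing.
lemma pvSkipSpace (rest : List Char) (st : PySem.Set Int × Int) :
    ((' ' :: rest).zip rest).foldl pvBodyP st = (rest.zip rest.tail).foldl pvBodyP st := by
  cases rest with
  | nil => rfl
  | cons r t =>
    simp only [List.zip_cons_cons, List.foldl_cons, List.tail_cons]
    have : pvBodyP st (' ', r) = st := by
      simp [pvBodyP]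
    rw [this]

-- Main loop equivalence: A's scan of " ".join(ws) equals B's prefix sums over ws[:-1].
lemma pvMain : ∀ (ws : List (List Char)), (∀ w ∈ ws, w ≠ [] ∧ ' ' ∉ w) →
    ∀ st : PySem.Set Int × Int,
    (((PySem.Chars.join [' '] ws).zip (PySem.Chars.join [' '] ws).tail).foldl pvBodyP st).1
    = (ws.dropLast.foldl pvBodyB st).1 := by
  intro ws
  induction ws with
  | nil => intro _ st; simp [PySem.Chars.join_nil]
  | cons w tail ih =>
    intro h st
    cases tail with
    | nil =>
      simp only [PySem.Chars.join_singleton]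
      have hd : ([w] : List (List Char)).dropLast = [] := rfl
      rw [hd]
      exact pvLastWord w (h w (by simp)).2 st
    | cons v rest =>
      have hw := h w (by simp)
      rw [PySem.Chars.join_cons_cons]
      have hshape : w ++ [' '] ++ PySem.Chars.join [' '] (v :: rest)
          = w ++ ' ' :: PySem.Chars.join [' '] (v :: rest) := by
        simp
      rw [hshape, pvCross w hw.1 hw.2, pvSkipSpace]
      rw [ih (fun u hu => h u (by simp [hu]))]
      simp [pvBodyB]

-- toList of the char-level words of B's String words.
lemma pvMapToList (cw : List (List Char)) :
    (cw.map String.ofList).map String.toList = cw := by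
  simp [List.map_map, Function.comp_def]

lemma pvSpaceToList : (" " : String).toList = [' '] := by decide

lemma pvEmptyToList : ("" : String).toList = [] := by decide

-- The squeezed strings agree.
lemma pvNoEq (cw : List (List Char)) (hgood : ∀ w ∈ cw, w ≠ [] ∧ ' ' ∉ w) :
    PySem.Str.replace (PySem.Str.join " " (cw.map String.ofList)) " " ""
      = PySem.Str.join "" (cw.map String.ofList) := by
  simp only [PySem.Str.replace, PySem.Str.join, String.toList_ofList, pvMapToList,
    pvSpaceToList, pvEmptyToList]
  congr 1
  rw [pvReplaceSpaces, pvFilterJoin cw (fun w hw => (hgood w hw).2)]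

-- The position sets agree.
lemma pvPosEq (cw : List (List Char)) (hgood : ∀ w ∈ cw, w ≠ [] ∧ ' ' ∉ w) :
    ((PySem.List.enumerate
        (PySem.List.slice (PySem.Str.join " " (cw.map String.ofList)).toList none (some (-1))) 0).foldl
      (fun st (p : Int × Char) =>
        (if p.2 ≠ ' ' ∧ PySem.List.pyGet? (PySem.Str.join " " (cw.map String.ofList)).toList (p.1 + 1) = some ' '
           then PySem.Set.add st.1 (st.2 + 1) else st.1,
         if p.2 ≠ ' ' then st.2 + 1 else st.2))
      ((PySem.Set.empty : PySem.Set Int), (0 : Int))).1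
    = ((PySem.List.slice (cw.map String.ofList) none (some (-1))).foldl
        (fun st w =>
          (PySem.Set.add st.1 (st.2 + PySem.Str.len w), st.2 + PySem.Str.len w))
        ((PySem.Set.empty : PySem.Set Int), (0 : Int))).1 := by
  have hs2 : (PySem.Str.join " " (cw.map String.ofList)).toList = PySem.Chars.join [' '] cw := by
    simp only [PySem.Str.join, String.toList_ofList, pvMapToList, pvSpaceToList]
  rw [hs2, PySem.List.slice_to_neg_one, PySem.List.slice_to_neg_one, pvEnumZip]
  rw [show (cw.map String.ofList).dropLast = cw.dropLast.map String.ofList from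
        (List.map_dropLast).symm, List.foldl_map]
  have hfun : (fun (st : PySem.Set Int × Int) (w : List Char) =>
      (PySem.Set.add st.1 (st.2 + PySem.Str.len (String.ofList w)),
       st.2 + PySem.Str.len (String.ofList w))) = pvBodyB := by
    funext st w
    simp [pvBodyB, PySem.Str.len]
  rw [hfun]
  exact pvMain cw hgood (PySem.Set.empty, 0)

-- ===== VERDICT (by name: the statement is the Claim_ definition above) =====
theorem to_squeezed_and_truth_spec : Claim_equal_to_squeezed_and_truth := by
  intro s _
  unfold Spec_to_squeezed_and_truth
  have hwords : PySem.Str.split₀ (PySem.Str.strip s)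
      = (PySem.Chars.split₀ (PySem.Str.strip s).toList).map String.ofList := rfl
  have hgood := pvWordsGood (PySem.Str.strip s).toList
  have hA : to_squeezed_and_truth s
      = (PySem.Str.replace (PySem.Str.join " " (PySem.Str.split₀ (PySem.Str.strip s))) " " "",
         ((PySem.List.enumerate
            (PySem.List.slice (PySem.Str.join " " (PySem.Str.split₀ (PySem.Str.strip s))).toList
              none (some (-1))) 0).foldl
          (fun st (p : Int × Char) =>
            (if p.2 ≠ ' ' ∧ PySem.List.pyGet?
                  (PySem.Str.join " " (PySem.Str.split₀ (PySem.Str.strip s))).toList (p.1 + 1) = some ' '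
               then PySem.Set.add st.1 (st.2 + 1) else st.1,
             if p.2 ≠ ' ' then st.2 + 1 else st.2))
          ((PySem.Set.empty : PySem.Set Int), (0 : Int))).1) := rfl
  have hB : to_squeezed_and_truth_alt s
      = (PySem.Str.join "" (PySem.Str.split₀ (PySem.Str.strip s)),
         ((PySem.List.slice (PySem.Str.split₀ (PySem.Str.strip s)) none (some (-1))).foldl
            (fun st w =>
              (PySem.Set.add st.1 (st.2 + PySem.Str.len w), st.2 + PySem.Str.len w))
            ((PySem.Set.empty : PySem.Set Int), (0 : Int))).1) := rfl
  rw [hA, hB, hwords]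
  exact congrArg₂ Prod.mk (pvNoEq _ hgood) (pvPosEq _ hgood)
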